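-- pv_equiv track=rewrite | github.com/newprev/PrevCliente | util/helpers/helpers.py | comparaFiltrosAny
-- ===== SOURCE A (Python) =====
-- from typing import Union, Tuple, List
--
-- def comparaFiltrosAny(lista1: Union[str, List[str]], lista2: Union[str, List[str]]) -> bool:
--     if isinstance(lista1, str) and isinstance(lista2, str):
--         return lista1 == lista2
--
--     elif isinstance(lista1, str) and isinstance(lista2, list):
--         return any((lista1 == item for item in lista2))
--
--     elif isinstance(lista1, list) and isinstance(lista2, str):
--         return any((lista2 == item for item in lista1))
--
--     else:
--         for itemA in lista1:
--             for itemB in lista2: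
--                 if itemA == itemB:
--                     return True
--
--         return False
-- ===== SOURCE B (Python) =====
-- from typing import Union, List
--
-- def comparaFiltrosAny(lista1: Union[str, List[str]], lista2: Union[str, List[str]]) -> bool:
--     # Sort-then-merge intersection test: normalize both arguments to lists,
--     # sort each, then do a two-pointer merge scan; a common element exists
--     # iff the scan hits an equal pair.
--     n1 = [lista1] if isinstance(lista1, str) else lista1
--     n2 = [lista2] if isinstance(lista2, str) else lista2
--     a, b = sorted(n1), sorted(n2)
--     i = j = 0
--     while i < len(a) and j < len(b):
--         if a[i] == b[j]:
--             return True
--         if a[i] < b[j]: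
--             i += 1
--         else:
--             j += 1
--     return False
-- ===== Notes on version B (the rewrite author's own statement) =====
-- stated objective: alternative
-- what changed: Replaces A's four-way isinstance dispatch with nested pairwise scans by a sort-then-merge intersection: normalize both arguments to lists, sort each, and run a two-pointer merge scan that stops at the first equal pair.
import Mathlib
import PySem

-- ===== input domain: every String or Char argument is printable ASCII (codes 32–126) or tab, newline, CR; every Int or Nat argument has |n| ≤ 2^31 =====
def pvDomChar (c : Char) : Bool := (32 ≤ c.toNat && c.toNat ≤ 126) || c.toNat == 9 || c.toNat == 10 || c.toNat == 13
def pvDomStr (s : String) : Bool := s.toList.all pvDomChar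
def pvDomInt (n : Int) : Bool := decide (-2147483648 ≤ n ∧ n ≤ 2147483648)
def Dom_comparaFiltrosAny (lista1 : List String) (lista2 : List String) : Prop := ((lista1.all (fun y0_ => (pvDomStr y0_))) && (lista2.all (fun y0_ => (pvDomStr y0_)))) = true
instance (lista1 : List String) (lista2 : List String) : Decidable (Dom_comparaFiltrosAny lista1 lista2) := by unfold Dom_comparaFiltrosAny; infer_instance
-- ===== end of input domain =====

-- B replaces A's four-way type dispatch with nested pairwise scans by a sort-then-merge
-- intersection test (a different algorithm of similar cost; not claimed faster).

-- ===== PORT A =====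
-- inner loop of A's list/list branch: `for itemB in lista2: if itemA == itemB: return True`
def comparaFiltrosAnyInner (itemA : String) : List String → Bool
  | [] => false
  | itemB :: rest => if itemA == itemB then true else comparaFiltrosAnyInner itemA rest

-- outer loop of A's list/list branch (the only branch reachable for List String arguments)
def comparaFiltrosAny (lista1 : List String) (lista2 : List String) : Bool :=
  match lista1 with
  | [] => false
  | itemA :: rest =>
    if comparaFiltrosAnyInner itemA lista2 then true else comparaFiltrosAny rest lista2

-- ===== PORT B =====
-- B's two-pointer merge scan over the two sorted lists (the while loop of Source B)
def mergeHas : List String → List String → Bool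
  | [], _ => false
  | _ :: _, [] => false
  | a :: as, b :: bs =>
    if a == b then true
    else if a < b then mergeHas as (b :: bs)
    else mergeHas (a :: as) bs
termination_by xs ys => xs.length + ys.length

-- B: normalize (identity here: both arguments are lists), sort each, merge-scan
def comparaFiltrosAny_alt (lista1 : List String) (lista2 : List String) : Bool :=
  mergeHas (PySem.List.sorted lista1 (fun x => x)) (PySem.List.sorted lista2 (fun x => x))

-- ===== PRECONDITION & SPEC =====
def Spec_comparaFiltrosAny (lista1 : List String) (lista2 : List String) (out : Bool) : Prop := out = comparaFiltrosAny_alt lista1 lista2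
instance (lista1 : List String) (lista2 : List String) (out : Bool) : Decidable (Spec_comparaFiltrosAny lista1 lista2 out) := by unfold Spec_comparaFiltrosAny; infer_instance

-- ===== CLAIM (what is proved, stated in full; the proofs are below) =====
def Claim_equal_comparaFiltrosAny : Prop := ∀ (lista1 : List String) (lista2 : List String), Dom_comparaFiltrosAny lista1 lista2 → Spec_comparaFiltrosAny lista1 lista2 (comparaFiltrosAny lista1 lista2)

-- ===== LEMMAS AND PROOFS =====
theorem inner_eq_contains (a : String) (l : List String) :
    comparaFiltrosAnyInner a l = l.contains a := by
  induction l with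
  | nil => rfl
  | cons b t ih =>
    by_cases h : a = b <;> simp [comparaFiltrosAnyInner, ih, h]

theorem portA_iff (lista1 lista2 : List String) :
    comparaFiltrosAny lista1 lista2 = true ↔ ∃ x, x ∈ lista1 ∧ x ∈ lista2 := by
  induction lista1 with
  | nil => simp [comparaFiltrosAny]
  | cons a t ih =>
    simp only [comparaFiltrosAny, inner_eq_contains]
    by_cases h : lista2.contains a = true
    · simp only [h, if_true, true_iff]
      exact ⟨a, by simp, by simpa using h⟩
    · rw [Bool.not_eq_true] at h
      simp only [h, Bool.false_eq_true, if_false, ih]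
      constructor
      · rintro ⟨x, hx1, hx2⟩; exact ⟨x, List.mem_cons_of_mem _ hx1, hx2⟩
      · rintro ⟨x, hx1, hx2⟩
        rcases List.mem_cons.mp hx1 with rfl | hx1
        · simp [List.contains_eq_any_beq] at h; exact absurd hx2 (by simpa using h)
        · exact ⟨x, hx1, hx2⟩

theorem mergeHas_iff (as bs : List String)
    (ha : as.Pairwise (· ≤ ·)) (hb : bs.Pairwise (· ≤ ·)) :
    mergeHas as bs = true ↔ ∃ x, x ∈ as ∧ x ∈ bs := by
  induction as, bs using mergeHas.induct with
  | case1 bs => simp [mergeHas]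
  | case2 a as => simp [mergeHas]
  | case3 a as b bs heq =>
    have hab : a = b := by simpa using heq
    simp only [mergeHas, heq, if_true, true_iff]
    exact ⟨a, by simp, by simp [hab]⟩
  | case4 a as b bs heq hlt ih =>
    have hne : a ≠ b := by simpa using heq
    have hstep : mergeHas (a :: as) (b :: bs) = mergeHas as (b :: bs) := by
      simp [mergeHas, heq, hlt]
    rw [List.pairwise_cons] at ha
    rw [hstep, ih ha.2 hb]
    constructor
    · rintro ⟨x, hx1, hx2⟩; exact ⟨x, List.mem_cons_of_mem _ hx1, hx2⟩
    · rintro ⟨x, hx1, hx2⟩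
      rcases List.mem_cons.mp hx1 with rfl | hx1
      · exfalso
        rcases List.mem_cons.mp hx2 with rfl | hx2
        · exact hne rfl
        · have := (List.pairwise_cons.mp hb).1 x hx2
          exact absurd (lt_of_lt_of_le hlt this) (lt_irrefl x)
      · exact ⟨x, hx1, hx2⟩
  | case5 a as b bs heq hlt ih =>
    have hne : a ≠ b := by simpa using heq
    have hba : b < a := by
      rcases lt_trichotomy a b with h | h | h
      · exact absurd h hlt
      · exact absurd h hne
      · exact h
    have hstep : mergeHas (a :: as) (b :: bs) = mergeHas (a :: as) bs := by
      simp [mergeHas, heq, hlt]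
    rw [List.pairwise_cons] at hb
    rw [hstep, ih ha hb.2]
    constructor
    · rintro ⟨x, hx1, hx2⟩; exact ⟨x, hx1, List.mem_cons_of_mem _ hx2⟩
    · rintro ⟨x, hx1, hx2⟩
      rcases List.mem_cons.mp hx2 with rfl | hx2
      · exfalso
        rcases List.mem_cons.mp hx1 with rfl | hx1
        · exact hne rfl
        · have := (List.pairwise_cons.mp ha).1 x hx1
          exact absurd (lt_of_lt_of_le hba this) (lt_irrefl x)
      · exact ⟨x, hx1, hx2⟩

theorem portB_iff (lista1 lista2 : List String) :
    comparaFiltrosAny_alt lista1 lista2 = true ↔ ∃ x, x ∈ lista1 ∧ x ∈ lista2 := by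
  unfold comparaFiltrosAny_alt
  rw [mergeHas_iff _ _ (by simpa using PySem.List.sorted_pairwise lista1 (fun x => x))
      (by simpa using PySem.List.sorted_pairwise lista2 (fun x => x))]
  simp [PySem.List.mem_sorted]

-- ===== VERDICT (by name: the statement is the Claim_ definition above) =====
theorem comparaFiltrosAny_spec : Claim_equal_comparaFiltrosAny := by
  intro lista1 lista2 _
  unfold Spec_comparaFiltrosAny
  rcases h : comparaFiltrosAny lista1 lista2 with _ | _
  · rcases hb : comparaFiltrosAny_alt lista1 lista2 with _ | _
    · rfl
    · exact absurd ((portA_iff lista1 lista2).mpr ((portB_iff lista1 lista2).mp hb))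
        (by simp [h])
  · exact ((portB_iff lista1 lista2).mpr ((portA_iff lista1 lista2).mp h)).symm
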